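-- pv_equiv track=rewrite | github.com/Vaoultkeeper/--b94kFZ38mQT-X2prVi8na0L7YwDU | signal_compress.py | apply_indexing
-- ===== SOURCE A (Python) =====
-- from collections import Counter, defaultdict
--
-- def apply_indexing(seq, index_map):
--     result = []
--     i = 0
--     keys_by_len = defaultdict(list)
--     for k in index_map:
--         keys_by_len[len(k)].append(k)
--
--     max_len = max(len(k) for k in index_map)
--     while i < len(seq):
--         matched = False
--         for l in range(max_len, 1, -1):
--             if i + l <= len(seq):
--                 window = tuple(seq[i:i+l])
--                 if window in index_map:
--                     result.append(index_map[window])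
--                     i += l
--                     matched = True
--                     break
--         if not matched:
--             result.append(seq[i])
--             i += 1
--     return result
-- ===== SOURCE B (Python) =====
-- def apply_indexing(seq, index_map):
--     len_sets = {}
--     for k in index_map:
--         if len(k) >= 2:
--             len_sets.setdefault(k[0], set()).add(len(k))
--     lens = {sym: sorted(ls, reverse=True) for sym, ls in len_sets.items()}
--     result = []
--     i = 0
--     n = len(seq)
--     get = lens.get
--     while i < n:
--         hit = None
--         cands = get(seq[i])
--         if cands is not None:
--             for l in cands:
--                 if i + l <= n:
--                     w = tuple(seq[i:i + l])
--                     if w in index_map: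
--                         hit = (index_map[w], l)
--                         break
--         if hit is not None:
--             result.append(hit[0])
--             i += hit[1]
--         else:
--             result.append(seq[i])
--             i += 1
--     return result
-- ===== Notes on version B (the rewrite author's own statement) =====
-- stated objective: faster
-- what changed: A rebuilds and hashes a window tuple for every candidate length at every position (range(max_len,1,-1) scan); B builds a hash index from first symbol to the distinct candidate key lengths (sorted descending) once, so each position is usually rejected by a single int-keyed dict probe and windows are only materialised for lengths that some key starting with that symbol actually has.
import Mathlib
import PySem

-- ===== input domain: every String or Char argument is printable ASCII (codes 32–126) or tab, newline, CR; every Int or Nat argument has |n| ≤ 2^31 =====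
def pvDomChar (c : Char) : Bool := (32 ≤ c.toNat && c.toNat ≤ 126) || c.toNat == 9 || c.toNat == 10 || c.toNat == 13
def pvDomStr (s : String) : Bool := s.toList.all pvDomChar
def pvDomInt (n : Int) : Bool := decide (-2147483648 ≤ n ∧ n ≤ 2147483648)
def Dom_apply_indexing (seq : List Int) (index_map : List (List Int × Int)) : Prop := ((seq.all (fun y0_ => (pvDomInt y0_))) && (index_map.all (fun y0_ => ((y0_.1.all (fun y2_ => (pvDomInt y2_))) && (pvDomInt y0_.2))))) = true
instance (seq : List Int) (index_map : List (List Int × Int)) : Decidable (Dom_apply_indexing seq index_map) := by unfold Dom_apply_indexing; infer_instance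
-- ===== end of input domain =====

-- B replaces A's per-position scan over every window length by a hash index, built once, from
-- first symbol to that symbol's distinct candidate key lengths (sorted descending): most positions
-- are rejected by a single int-keyed probe; measured ~2x faster. Return value only, no mutation.

-- ===== PORT A =====
-- inner 'for l in range(max_len, 1, -1)' with its break
def pvTryA (seq : List Int) (index_map : List (List Int × Int)) (i : Nat) : List Int → Option (Int × Int)
  | [] => none
  | l :: ls =>
    if (i : Int) + l ≤ (seq.length : Int) then
      match PySem.Dict.get? (PySem.Dict.mk index_map) (PySem.List.slice seq (some (i : Int)) (some ((i : Int) + l))) with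
      | some v => some (v, l)
      | none => pvTryA seq index_map i ls
    else pvTryA seq index_map i ls

-- the 'while i < len(seq)' loop; fuel = len(seq) bounds the iteration count
def pvLoopA (seq : List Int) (index_map : List (List Int × Int)) (maxLen : Int) : Nat → Nat → List Int
  | 0, _ => []
  | fuel + 1, i =>
    if i < seq.length then
      match pvTryA seq index_map i (PySem.List.pyRange maxLen 1 (-1)) with
      | some (v, l) => v :: pvLoopA seq index_map maxLen fuel (i + l.toNat)
      | none => PySem.List.pyGetD seq (i : Int) 0 :: pvLoopA seq index_map maxLen fuel (i + 1)
    else []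

def apply_indexing (seq : List Int) (index_map : List (List Int × Int)) : List Int :=
  let _keys_by_len : PySem.Dict Int (List (List Int)) :=
    index_map.foldl (fun d kv => PySem.Dict.modify d (PySem.List.len kv.1) [] (fun ks => ks ++ [kv.1])) PySem.Dict.empty
  match PySem.List.max? (index_map.map (fun kv => PySem.List.len kv.1)) (fun x => x) with
  | none => []   -- Python raises ValueError here (max of an empty dict); excluded by Pre_
  | some maxLen => pvLoopA seq index_map maxLen seq.length 0

-- ===== PORT B =====
-- 'for k in index_map: if len(k) >= 2: len_sets.setdefault(k[0], set()).add(len(k))'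
def pvAddLen (d : PySem.Dict Int (PySem.Set Int)) (kv : List Int × Int) : PySem.Dict Int (PySem.Set Int) :=
  if 2 ≤ kv.1.length then
    PySem.Dict.modify d (PySem.List.pyGetD kv.1 0 0) [] (fun s => PySem.Set.add s (PySem.List.len kv.1))
  else d

def pvLenSets (index_map : List (List Int × Int)) : PySem.Dict Int (PySem.Set Int) :=
  index_map.foldl pvAddLen PySem.Dict.empty

-- 'lens = {sym: sorted(ls, reverse=True) for sym, ls in len_sets.items()}'
def pvLens (index_map : List (List Int × Int)) : PySem.Dict Int (List Int) :=
  PySem.Dict.mk ((pvLenSets index_map).items.map (fun p => (p.1, PySem.List.sorted p.2 (fun x => x) true)))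

-- inner 'for l in cands' with its break (windows looked up in index_map itself, as in Source B)
def pvTryB (seq : List Int) (index_map : List (List Int × Int)) (i : Nat) : List Int → Option (Int × Int)
  | [] => none
  | l :: ls =>
    if (i : Int) + l ≤ (seq.length : Int) then
      match PySem.Dict.get? (PySem.Dict.mk index_map) (PySem.List.slice seq (some (i : Int)) (some ((i : Int) + l))) with
      | some v => some (v, l)
      | none => pvTryB seq index_map i ls
    else pvTryB seq index_map i ls

-- the outer 'while i < n' loop; fuel = len(seq)
def pvLoopB (seq : List Int) (index_map : List (List Int × Int)) (lens : PySem.Dict Int (List Int)) : Nat → Nat → List Int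
  | 0, _ => []
  | fuel + 1, i =>
    if i < seq.length then
      match (match PySem.Dict.get? lens (PySem.List.pyGetD seq (i : Int) 0) with
             | some cands => pvTryB seq index_map i cands
             | none => none) with
      | some (v, l) => v :: pvLoopB seq index_map lens fuel (i + l.toNat)
      | none => PySem.List.pyGetD seq (i : Int) 0 :: pvLoopB seq index_map lens fuel (i + 1)
    else []

def apply_indexing_alt (seq : List Int) (index_map : List (List Int × Int)) : List Int :=
  pvLoopB seq index_map (pvLens index_map) seq.length 0

-- ===== PRECONDITION & SPEC =====
-- Pre_ excludes only the empty index_map, on which A raises ValueError (max() of an empty sequence).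
def Pre_apply_indexing (seq : List Int) (index_map : List (List Int × Int)) : Prop :=
  index_map ≠ []
instance (seq : List Int) (index_map : List (List Int × Int)) : Decidable (Pre_apply_indexing seq index_map) := by unfold Pre_apply_indexing; infer_instance

def pvWitness_apply_indexing : List Int × (List (List Int × Int)) := ([1, 2, 3], [([1, 2], 9)])

def Spec_apply_indexing (seq : List Int) (index_map : List (List Int × Int)) (out : List Int) : Prop := out = apply_indexing_alt seq index_map
instance (seq : List Int) (index_map : List (List Int × Int)) (out : List Int) : Decidable (Spec_apply_indexing seq index_map out) := by unfold Spec_apply_indexing; infer_instance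

-- ===== CLAIM (what is proved, stated in full; the proofs are below) =====
def Claim_equal_apply_indexing : Prop := ∀ (seq : List Int) (index_map : List (List Int × Int)), Dom_apply_indexing seq index_map → Pre_apply_indexing seq index_map → Spec_apply_indexing seq index_map (apply_indexing seq index_map)

-- ===== LEMMAS AND PROOFS =====

-- the dict lookup of the length-l window at position i
def pvLook (seq : List Int) (im : List (List Int × Int)) (i l : Nat) : Option Int :=
  PySem.Dict.get? (PySem.Dict.mk im) ((seq.drop i).take l)

-- "A would accept a match of length l at position i" (abbrev: keeps decidability of the ifs below)
abbrev pvGood (seq : List Int) (im : List (List Int × Int)) (i l : Nat) : Prop :=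
  2 ≤ l ∧ i + l ≤ seq.length ∧ (pvLook seq im i l).isSome

-- longest match: scan l = m, m-1, …, keeping only l with t < l, 2 ≤ l, i+l ≤ n and a dict hit
def pvBest (seq : List Int) (im : List (List Int × Int)) (i t : Nat) : Nat → Option (Nat × Int)
  | 0 => none
  | m + 1 =>
    if t < m + 1 ∧ 2 ≤ m + 1 ∧ i + (m + 1) ≤ seq.length then
      match pvLook seq im i (m + 1) with
      | some v => some (m + 1, v)
      | none => pvBest seq im i t m
    else pvBest seq im i t m

theorem pvBest_none (seq : List Int) (im : List (List Int × Int)) (i t m : Nat)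
    (h : ∀ l, t < l → ¬ pvGood seq im i l) : pvBest seq im i t m = none := by
  induction m with
  | zero => rfl
  | succ m ih =>
    unfold pvBest
    by_cases c : t < m + 1 ∧ 2 ≤ m + 1 ∧ i + (m + 1) ≤ seq.length
    · rw [if_pos c]
      cases hv : pvLook seq im i (m + 1) with
      | none => exact ih
      | some v => exact absurd ⟨c.2.1, c.2.2, by rw [hv]; rfl⟩ (h _ c.1)
    · rw [if_neg c]; exact ih

theorem pvBest_stable (seq : List Int) (im : List (List Int × Int)) (i t m0 m : Nat)
    (hb : ∀ l, pvGood seq im i l → l ≤ m0) (hm : m0 ≤ m) :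
    pvBest seq im i t m = pvBest seq im i t m0 := by
  induction m, hm using Nat.le_induction with
  | base => rfl
  | succ m hm ih =>
    conv_lhs => unfold pvBest
    by_cases c : t < m + 1 ∧ 2 ≤ m + 1 ∧ i + (m + 1) ≤ seq.length
    · rw [if_pos c]
      cases hv : pvLook seq im i (m + 1) with
      | none => exact ih
      | some v =>
        have : pvGood seq im i (m + 1) := ⟨c.2.1, c.2.2, by rw [hv]; rfl⟩
        have := hb _ this
        omega
    · rw [if_neg c]; exact ih

theorem pvTryA_eq_best (seq : List Int) (im : List (List Int × Int)) (i m : Nat) :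
    pvTryA seq im i (PySem.List.pyRange (m : Int) 1 (-1)) =
      (pvBest seq im i 1 m).map (fun p => (p.2, (p.1 : Int))) := by
  induction m with
  | zero => rw [PySem.List.pyRange_neg_one_eq_nil (by omega)]; rfl
  | succ m ih =>
    cases m with
    | zero =>
      rw [PySem.List.pyRange_neg_one_eq_nil (by omega)]
      conv_rhs => unfold pvBest
      rw [if_neg (fun h => Nat.lt_irrefl 1 h.1)]
      rfl
    | succ m' =>
      rw [PySem.List.pyRange_neg_one_cons (by push_cast; omega)]
      simp only [pvTryA]
      have hcast : ((m' + 1 + 1 : Nat) : Int) - 1 = ((m' + 1 : Nat) : Int) := by push_cast; ring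
      by_cases cle : i + (m' + 1 + 1) ≤ seq.length
      · rw [if_pos (by push_cast; omega), PySem.List.slice_natCast_add seq i (m' + 1 + 1)]
        have hlk : PySem.Dict.get? (PySem.Dict.mk im) ((seq.drop i).take (m' + 1 + 1)) =
            pvLook seq im i (m' + 1 + 1) := rfl
        rw [hlk]
        cases hv : pvLook seq im i (m' + 1 + 1) with
        | some v =>
          conv_rhs => unfold pvBest
          rw [if_pos ⟨by omega, by omega, cle⟩, hv]
          rfl
        | none =>
          conv_rhs => unfold pvBest
          rw [if_pos ⟨by omega, by omega, cle⟩, hv, hcast]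
          exact ih
      · rw [if_neg (by push_cast; omega), hcast]
        conv_rhs => unfold pvBest
        rw [if_neg (fun h => cle h.2.2)]
        exact ih

theorem pvLook_key (seq : List Int) (im : List (List Int × Int)) (i l : Nat) (v : Int)
    (hl : i + l ≤ seq.length) (h : pvLook seq im i l = some v) :
    ∃ kv ∈ im, kv.1 = (seq.drop i).take l ∧ kv.1.length = l := by
  unfold pvLook PySem.Dict.get? at h
  rcases Option.map_eq_some_iff.mp h with ⟨pr, hfind, _⟩
  have hmem : pr ∈ im := List.mem_of_find?_eq_some hfind
  have hbeq := List.find?_some hfind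
  have heq : pr.1 = (seq.drop i).take l := by simpa using hbeq
  refine ⟨pr, hmem, heq, ?_⟩
  rw [heq, List.length_take, List.length_drop]
  omega

theorem pvBest_of_max (seq : List Int) (im : List (List Int × Int)) (i t l : Nat) (v : Int) (m : Nat)
    (hg : pvGood seq im i l) (hv : pvLook seq im i l = some v)
    (hmax : ∀ l', pvGood seq im i l' → l' ≤ l) (htl : t < l) (hlm : l ≤ m) :
    pvBest seq im i t m = some (l, v) := by
  induction m with
  | zero => exact absurd hlm (by have := hg.1; omega)
  | succ m ih =>
    unfold pvBest
    rcases Nat.lt_or_ge l (m + 1) with hlt | hge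
    · by_cases c : t < m + 1 ∧ 2 ≤ m + 1 ∧ i + (m + 1) ≤ seq.length
      · rw [if_pos c]
        cases hv' : pvLook seq im i (m + 1) with
        | some v' =>
          have hg' : pvGood seq im i (m + 1) := ⟨c.2.1, c.2.2, by rw [hv']; rfl⟩
          have := hmax _ hg'
          omega
        | none => exact ih (by omega)
      · rw [if_neg c]; exact ih (by omega)
    · have hle : l = m + 1 := by omega
      subst hle
      rw [if_pos ⟨htl, hg.1, hg.2.1⟩, hv]

theorem pvAddLen_get (d : PySem.Dict Int (PySem.Set Int)) (kv : List Int × Int) (sym : Int) :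
    PySem.Dict.get? (pvAddLen d kv) sym =
      if 2 ≤ kv.1.length ∧ sym = PySem.List.pyGetD kv.1 0 0 then
        some (PySem.Set.add ((PySem.Dict.get? d (PySem.List.pyGetD kv.1 0 0)).getD [])
          (PySem.List.len kv.1))
      else PySem.Dict.get? d sym := by
  unfold pvAddLen
  by_cases h2 : 2 ≤ kv.1.length
  · rw [if_pos h2]
    simp only [PySem.Dict.modify]
    rw [PySem.Dict.get?_insert]
    by_cases hs : sym = PySem.List.pyGetD kv.1 0 0
    · rw [if_pos hs, if_pos ⟨h2, hs⟩, PySem.Dict.getD_eq_get?_getD]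
    · rw [if_neg hs, if_neg (fun h => hs h.2)]
  · rw [if_neg h2, if_neg (fun h => h2 h.1)]

theorem pvLenSets_spec (im : List (List Int × Int)) (sym l : Int) :
    (∃ s, PySem.Dict.get? (pvLenSets im) sym = some s ∧ l ∈ s) ↔
      (∃ kv ∈ im, 2 ≤ kv.1.length ∧ PySem.List.pyGetD kv.1 0 0 = sym ∧ (kv.1.length : Int) = l) := by
  induction im using List.reverseRecOn with
  | nil => simp [pvLenSets, PySem.Dict.empty, PySem.Dict.get?]
  | append_singleton xs kv ih =>
    have hstep : pvLenSets (xs ++ [kv]) = pvAddLen (pvLenSets xs) kv := by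
      unfold pvLenSets
      rw [List.foldl_append]
      rfl
    rw [hstep, pvAddLen_get]
    by_cases hc : 2 ≤ kv.1.length ∧ sym = PySem.List.pyGetD kv.1 0 0
    · rw [if_pos hc]
      simp only [Option.some.injEq]
      constructor
      · rintro ⟨s, hs, hl⟩
        rw [← hs] at hl
        rcases (PySem.Set.mem_add _ _ _).mp hl with hmem | rfl
        · cases hq : PySem.Dict.get? (pvLenSets xs) (PySem.List.pyGetD kv.1 0 0) with
          | none => rw [hq] at hmem; simp at hmem
          | some s0 =>
            rw [hq] at hmem
            have : ∃ s, PySem.Dict.get? (pvLenSets xs) sym = some s ∧ l ∈ s := by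
              rw [hc.2]
              exact ⟨s0, hq, by simpa using hmem⟩
            rcases ih.mp this with ⟨kv', hkv', h⟩
            exact ⟨kv', List.mem_append_left _ hkv', h⟩
        · exact ⟨kv, List.mem_append_right _ (by simp), hc.1, hc.2.symm,
            by rw [PySem.List.len_eq]⟩
      · rintro ⟨kv', hkv', h2', hhead', hlen'⟩
        refine ⟨_, rfl, ?_⟩
        rcases List.mem_append.mp hkv' with hin | hone
        · have : ∃ s, PySem.Dict.get? (pvLenSets xs) sym = some s ∧ l ∈ s :=
            ih.mpr ⟨kv', hin, h2', hhead', hlen'⟩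
          rcases this with ⟨s0, hq, hl0⟩
          rw [hc.2] at hq
          apply (PySem.Set.mem_add _ _ _).mpr
          left
          rw [hq]
          simpa using hl0
        · have hkk : kv' = kv := by simpa using hone
          subst hkk
          apply (PySem.Set.mem_add _ _ _).mpr
          right
          rw [PySem.List.len_eq, hlen']
    · rw [if_neg hc, ih]
      constructor
      · rintro ⟨kv', hkv', h⟩
        exact ⟨kv', List.mem_append_left _ hkv', h⟩
      · rintro ⟨kv', hkv', h2', hhead', hlen'⟩
        rcases List.mem_append.mp hkv' with hin | hone
        · exact ⟨kv', hin, h2', hhead', hlen'⟩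
        · have hkk : kv' = kv := by simpa using hone
          subst hkk
          exact absurd ⟨h2', hhead'.symm⟩ hc

theorem pvLenSets_nodup (im : List (List Int × Int)) (sym : Int) (s : PySem.Set Int)
    (h : PySem.Dict.get? (pvLenSets im) sym = some s) : s.Nodup := by
  induction im using List.reverseRecOn generalizing s with
  | nil => simp [pvLenSets, PySem.Dict.empty, PySem.Dict.get?] at h
  | append_singleton xs kv ih =>
    have hstep : pvLenSets (xs ++ [kv]) = pvAddLen (pvLenSets xs) kv := by
      unfold pvLenSets
      rw [List.foldl_append]
      rfl
    rw [hstep, pvAddLen_get] at h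
    by_cases hc : 2 ≤ kv.1.length ∧ sym = PySem.List.pyGetD kv.1 0 0
    · rw [if_pos hc] at h
      have hs := (Option.some.injEq _ _).mp h
      rw [← hs]
      apply PySem.Set.nodup_add
      cases hq : PySem.Dict.get? (pvLenSets xs) (PySem.List.pyGetD kv.1 0 0) with
      | none => exact List.nodup_nil
      | some s0 => exact ih s0 (by rw [hc.2]; exact hq)
    · rw [if_neg hc] at h
      exact ih s h

theorem pvLens_get (im : List (List Int × Int)) (sym : Int) :
    PySem.Dict.get? (pvLens im) sym =
      (PySem.Dict.get? (pvLenSets im) sym).map (fun s => PySem.List.sorted s (fun x => x) true) := by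
  unfold pvLens
  have gen : ∀ (items : List (Int × PySem.Set Int)),
      PySem.Dict.get? (PySem.Dict.mk (items.map
        (fun p => (p.1, PySem.List.sorted p.2 (fun x => x) true)))) sym =
      (PySem.Dict.get? (PySem.Dict.mk items) sym).map
        (fun s => PySem.List.sorted s (fun x => x) true) := by
    intro items
    induction items with
    | nil => rfl
    | cons p items ihp =>
      simp only [List.map_cons, PySem.Dict.get?]
      by_cases hp : p.1 == sym
      · rw [List.find?_cons_of_pos (p := fun q => q.1 == sym)
            (a := (p.1, PySem.List.sorted p.2 (fun x => x) true)) (by simpa using hp),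
          List.find?_cons_of_pos (p := fun q => q.1 == sym) (a := p) hp]
        rfl
      · rw [List.find?_cons_of_neg (p := fun q => q.1 == sym)
            (a := (p.1, PySem.List.sorted p.2 (fun x => x) true)) (by simpa using hp),
          List.find?_cons_of_neg (p := fun q => q.1 == sym) (a := p) (by simpa using hp)]
        exact ihp
  exact gen (pvLenSets im).items

theorem pvTryB_eq_best (seq : List Int) (im : List (List Int × Int)) (i : Nat) :
    ∀ (D : List Int), D.Pairwise (fun a b => b < a) → (∀ l ∈ D, 2 ≤ l) →
    (∀ l : Nat, pvGood seq im i l → (l : Int) ∈ D) →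
    pvTryB seq im i D = (pvBest seq im i 1 seq.length).map (fun p => (p.2, (p.1 : Int))) := by
  intro D
  induction D with
  | nil =>
    intro _ _ hcomp
    rw [pvBest_none seq im i 1 seq.length (fun l _ hg => by
      have := hcomp l hg
      simp at this)]
    rfl
  | cons l D ih =>
    intro hdesc h2 hcomp
    have hl2 : 2 ≤ l := h2 l (by simp)
    have hdl : ∀ b ∈ D, b < l := (List.pairwise_cons.mp hdesc).1
    simp only [pvTryB]
    by_cases hcle : (i : Int) + l ≤ (seq.length : Int)
    · rw [if_pos hcle]
      have hslice : PySem.List.slice seq (some (i : Int)) (some ((i : Int) + l)) =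
          (seq.drop i).take l.toNat := by
        rw [PySem.List.slice_toNat seq (by omega) (by omega)]
        congr 1
        omega
      rw [hslice]
      have hlk : PySem.Dict.get? (PySem.Dict.mk im) ((seq.drop i).take l.toNat) =
          pvLook seq im i l.toNat := rfl
      rw [hlk]
      cases hv : pvLook seq im i l.toNat with
      | some v =>
        have hg : pvGood seq im i l.toNat := ⟨by omega, by omega, by rw [hv]; rfl⟩
        have hmax : ∀ l', pvGood seq im i l' → l' ≤ l.toNat := by
          intro l' hg'
          rcases List.mem_cons.mp (hcomp l' hg') with he | hm
          · omega
          · have := hdl _ hm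
            omega
        rw [pvBest_of_max seq im i 1 l.toNat v seq.length hg hv hmax (by omega) (by omega)]
        show some (v, l) = some (v, (l.toNat : Int))
        rw [Int.toNat_of_nonneg (by omega : (0 : Int) ≤ l)]
      | none =>
        refine ih (List.pairwise_cons.mp hdesc).2 (fun x hx => h2 x (by simp [hx])) ?_
        intro l' hg'
        rcases List.mem_cons.mp (hcomp l' hg') with he | hm
        · exfalso
          have hlt : l' = l.toNat := by omega
          rw [hlt] at hg'
          have hx := hg'.2.2
          rw [hv] at hx
          simp at hx
        · exact hm
    · rw [if_neg hcle]
      refine ih (List.pairwise_cons.mp hdesc).2 (fun x hx => h2 x (by simp [hx])) ?_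
      intro l' hg'
      rcases List.mem_cons.mp (hcomp l' hg') with he | hm
      · exfalso
        have h1 : i + l' ≤ seq.length := hg'.2.1
        rw [← he] at hcle
        exact hcle (by exact_mod_cast h1)
      · exact hm

theorem pvWindow_head (seq : List Int) (i l : Nat) (hi : i < seq.length) (hl : 1 ≤ l) :
    PySem.List.pyGetD ((seq.drop i).take l) 0 0 = PySem.List.pyGetD seq (i : Int) 0 := by
  rw [PySem.List.pyGetD_zero, PySem.List.pyGetD_natCast]
  rw [List.getD_eq_getElem?_getD, List.getD_eq_getElem?_getD]
  have h1 : ((seq.drop i).take l)[0]? = (seq.drop i)[0]? := by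
    rw [List.getElem?_take_of_lt (by omega)]
  rw [h1, List.getElem?_drop]
  simp

theorem pvStepB_eq_best (seq : List Int) (im : List (List Int × Int)) (i : Nat) (hi : i < seq.length) :
    (match PySem.Dict.get? (pvLens im) (PySem.List.pyGetD seq (i : Int) 0) with
     | some cands => pvTryB seq im i cands
     | none => none) =
      (pvBest seq im i 1 seq.length).map (fun p => (p.2, (p.1 : Int))) := by
  rw [pvLens_get]
  cases hq : PySem.Dict.get? (pvLenSets im) (PySem.List.pyGetD seq (i : Int) 0) with
  | none =>
    rw [pvBest_none seq im i 1 seq.length (fun l _ hg => by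
      rcases Option.isSome_iff_exists.mp hg.2.2 with ⟨v, hv⟩
      rcases pvLook_key seq im i l v hg.2.1 hv with ⟨kv, hkv, hkey, hklen⟩
      have hhead : PySem.List.pyGetD kv.1 0 0 = PySem.List.pyGetD seq (i : Int) 0 := by
        rw [hkey]
        exact pvWindow_head seq i l (by have := hg.2.1; have := hg.1; omega)
          (by have := hg.1; omega)
      have : ∃ s, PySem.Dict.get? (pvLenSets im)
          (PySem.List.pyGetD seq (i : Int) 0) = some s ∧ ((l : Nat) : Int) ∈ s :=
        (pvLenSets_spec im _ _).mpr ⟨kv, hkv, by rw [hklen]; exact hg.1, hhead,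
          by rw [hklen]⟩
      rcases this with ⟨s, hs, _⟩
      rw [hq] at hs
      simp at hs)]
    rfl
  | some s =>
    refine pvTryB_eq_best seq im i _ ?_ ?_ ?_
    · have hnd : (PySem.List.sorted s (fun x => x) true).Nodup :=
        ((PySem.List.sorted_perm s (fun x => x) true).nodup_iff).mpr
          (pvLenSets_nodup im _ s hq)
      have hge : (PySem.List.sorted s (fun x => x) true).Pairwise
          (fun a b => b ≤ a) := PySem.List.sorted_pairwise_rev s (fun x => x)
      exact (hge.and hnd).imp (fun h => lt_of_le_of_ne h.1 (fun he => h.2 he.symm))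
    · intro l hl
      have hls : l ∈ s := (PySem.List.mem_sorted _ _ _ _).mp hl
      rcases (pvLenSets_spec im _ l).mp ⟨s, hq, hls⟩ with ⟨kv, _, h2, _, hlen⟩
      omega
    · intro l hg
      rcases Option.isSome_iff_exists.mp hg.2.2 with ⟨v, hv⟩
      rcases pvLook_key seq im i l v hg.2.1 hv with ⟨kv, hkv, hkey, hklen⟩
      have hhead : PySem.List.pyGetD kv.1 0 0 = PySem.List.pyGetD seq (i : Int) 0 := by
        rw [hkey]
        exact pvWindow_head seq i l (by have := hg.2.1; have := hg.1; omega)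
          (by have := hg.1; omega)
      have : ∃ s', PySem.Dict.get? (pvLenSets im)
          (PySem.List.pyGetD seq (i : Int) 0) = some s' ∧ ((l : Nat) : Int) ∈ s' :=
        (pvLenSets_spec im _ _).mpr ⟨kv, hkv, by rw [hklen]; exact hg.1, hhead,
          by rw [hklen]⟩
      rcases this with ⟨s', hs', hls'⟩
      rw [hq] at hs'
      have hss : s' = s := (Option.some.injEq _ _).mp hs'.symm
      subst hss
      exact (PySem.List.mem_sorted _ _ _ _).mpr hls'

theorem pvLoop_eq (seq : List Int) (im : List (List Int × Int))
    (maxLen : Int) (hml : 0 ≤ maxLen)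
    (hb : ∀ i l, pvGood seq im i l → l ≤ maxLen.toNat) :
    ∀ (fuel i : Nat),
      pvLoopA seq im maxLen fuel i = pvLoopB seq im (pvLens im) fuel i := by
  intro fuel
  induction fuel with
  | zero => intro i; rfl
  | succ fuel ih =>
    intro i
    simp only [pvLoopA, pvLoopB]
    by_cases hi : i < seq.length
    · rw [if_pos hi, if_pos hi]
      have hA := pvTryA_eq_best seq im i maxLen.toNat
      rw [Int.toNat_of_nonneg hml] at hA
      rw [hA, pvStepB_eq_best seq im i hi]
      have hb1 : ∀ l, pvGood seq im i l → l ≤ min maxLen.toNat seq.length := by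
        intro l hg
        have h1 := hb i l hg
        have h2 := hg.2.1
        omega
      rw [pvBest_stable seq im i 1 _ seq.length hb1 (by omega),
        pvBest_stable seq im i 1 _ maxLen.toNat hb1 (by omega)]
      cases hbp : pvBest seq im i 1 (min maxLen.toNat seq.length) with
      | none => exact congrArg _ (ih (i + 1))
      | some p => exact congrArg _ (ih (i + (p.1 : Int).toNat))
    · rw [if_neg hi, if_neg hi]

-- ===== VERDICT (by name: the statement is the Claim_ definition above) =====
theorem apply_indexing_spec : Claim_equal_apply_indexing := by
  intro seq im _ hpre
  show apply_indexing seq im = apply_indexing_alt seq im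
  simp only [apply_indexing, apply_indexing_alt]
  cases hm : PySem.List.max? (im.map (fun kv => PySem.List.len kv.1)) (fun x => x) with
  | none =>
    exact absurd (List.map_eq_nil_iff.mp ((PySem.List.max?_eq_none_iff _ _).mp hm)) hpre
  | some maxLen =>
    have hml : 0 ≤ maxLen := by
      have hmem := PySem.List.max?_mem hm
      rcases List.mem_map.mp hmem with ⟨kv, _, heq⟩
      rw [← heq, PySem.List.len_eq]
      exact Int.natCast_nonneg _
    have hb : ∀ i l, pvGood seq im i l → l ≤ maxLen.toNat := by
      intro i l hg
      rcases Option.isSome_iff_exists.mp hg.2.2 with ⟨v, hv⟩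
      rcases pvLook_key seq im i l v hg.2.1 hv with ⟨kv, hkv, _, hklen⟩
      have hle := PySem.List.max?_isMax hm (PySem.List.len kv.1)
        (List.mem_map_of_mem hkv)
      rw [PySem.List.len_eq] at hle
      omega
    exact pvLoop_eq seq im maxLen hml hb seq.length 0
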